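-- pv_equiv track=rewrite | github.com/batmen-lab/BioMANIA | src/deploy/model.py | extract_last_error_sentence_from_list
-- ===== SOURCE A (Python) =====
-- def extract_last_error_sentence_from_list(log):
--     """
--     Extract the last error sentence from a log string, including traceback information.
--
--     Parameters:
--     log (str): The log string.
--
--     Returns:
--     str: The last error sentence with traceback information if found, otherwise an empty string.
--     """
--     # Split the log string into individual lines
--     output_list = log.strip().split('\n')
--     # Find the index of the last occurrence of 'Error:' in the list
--     error_index = next((index for index, value in enumerate(output_list) if 'Error:' in value), None)
--     # Filter the list to include only the elements starting from the last error
--     if error_index is not None: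
--         filtered_output_list = output_list[error_index:]
--     else:
--         filtered_output_list = []
--     # Join the filtered list into a single string for output
--     if filtered_output_list:
--         executor_info = "\n".join(filtered_output_list)
--     else:
--         executor_info = ""
--     return executor_info
-- ===== SOURCE B (Python) =====
-- def extract_last_error_sentence_from_list(log):
--     """Return the suffix of the stripped log starting at the line of the
--     first 'Error:' occurrence, or '' if there is none."""
--     s = log.strip()
--     idx = s.find('Error:')
--     if idx == -1:
--         return ''
--     line_start = s.rfind('\n', 0, idx) + 1
--     return s[line_start:]
-- ===== Notes on version B (the rewrite author's own statement) =====
-- stated objective: idiomatic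
-- what changed: B works on the raw stripped string with find/rfind and one slice instead of splitting into a list of lines, scanning it with enumerate, slicing the list and re-joining with newlines.
import Mathlib
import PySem

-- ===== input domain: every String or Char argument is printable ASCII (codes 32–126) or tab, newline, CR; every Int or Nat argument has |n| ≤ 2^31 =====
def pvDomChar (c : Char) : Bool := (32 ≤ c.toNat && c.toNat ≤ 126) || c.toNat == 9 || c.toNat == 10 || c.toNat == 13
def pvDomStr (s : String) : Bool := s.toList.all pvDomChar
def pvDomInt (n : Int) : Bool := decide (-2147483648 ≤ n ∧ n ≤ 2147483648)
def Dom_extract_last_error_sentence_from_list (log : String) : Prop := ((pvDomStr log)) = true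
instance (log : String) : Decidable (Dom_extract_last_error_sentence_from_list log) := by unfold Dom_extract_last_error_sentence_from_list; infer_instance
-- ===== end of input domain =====

-- B replaces A's split-into-lines / enumerate / list-slice / join pipeline by find/rfind
-- and a single slice on the stripped string (idiomatic; same O(n) cost).

-- the search substring 'Error:'
def pvErr : List Char := ['E', 'r', 'r', 'o', 'r', ':']

-- ===== PORT A =====
def extract_last_error_sentence_from_list (log : String) : String :=
  -- output_list = log.strip().split('\n')
  let output_list : List (List Char) :=
    PySem.Chars.splitOn (PySem.Chars.strip log.toList) ['\n']
  -- error_index = next((index for index, value in enumerate(output_list) if 'Error:' in value), None)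
  let error_index : Option Int :=
    ((PySem.List.enumerate output_list).find? (fun p => PySem.Chars.isIn pvErr p.2)).map (fun p => p.1)
  -- filtered_output_list = output_list[error_index:] if error_index is not None else []
  let filtered_output_list : List (List Char) :=
    match error_index with
    | some i => PySem.List.slice output_list (some i) none
    | none => []
  -- executor_info = "\n".join(filtered_output_list) if filtered_output_list else ""
  let executor_info : List Char :=
    if filtered_output_list = [] then [] else PySem.Chars.join ['\n'] filtered_output_list
  String.ofList executor_info

-- ===== PORT B =====
def extract_last_error_sentence_from_list_alt (log : String) : String :=
  let s : List Char := PySem.Chars.strip log.toList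
  let idx : Int := PySem.Chars.find s pvErr
  if idx = -1 then ""
  else
    -- line_start = s.rfind('\n', 0, idx) + 1
    let line_start : Int := PySem.Chars.rfindFrom s ['\n'] 0 (some idx) + 1
    String.ofList (PySem.Chars.slice s (some line_start) none)

-- ===== PRECONDITION & SPEC =====
def Spec_extract_last_error_sentence_from_list (log : String) (out : String) : Prop := out = extract_last_error_sentence_from_list_alt log
instance (log : String) (out : String) : Decidable (Spec_extract_last_error_sentence_from_list log out) := by unfold Spec_extract_last_error_sentence_from_list; infer_instance

-- ===== CLAIM (what is proved, stated in full; the proofs are below) =====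
def Claim_equal_extract_last_error_sentence_from_list : Prop := ∀ (log : String), Dom_extract_last_error_sentence_from_list log → Spec_extract_last_error_sentence_from_list log (extract_last_error_sentence_from_list log)

-- ===== LEMMAS AND PROOFS =====

-- A's computation after the strip, as a function of the stripped char list
def pvA (cs : List Char) : List Char :=
  let output_list := PySem.Chars.splitOn cs ['\n']
  let error_index : Option Int :=
    ((PySem.List.enumerate output_list).find? (fun p => PySem.Chars.isIn pvErr p.2)).map (fun p => p.1)
  let filtered_output_list : List (List Char) :=
    match error_index with
    | some i => PySem.List.slice output_list (some i) none
    | none => ([] : List (List Char))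
  if filtered_output_list = [] then [] else PySem.Chars.join ['\n'] filtered_output_list

-- B's computation after the strip
def pvB (cs : List Char) : List Char :=
  let idx := PySem.Chars.find cs pvErr
  if idx = -1 then []
  else PySem.Chars.slice cs (some (PySem.Chars.rfindFrom cs ['\n'] 0 (some idx) + 1)) none

lemma portA_eq (log : String) :
    extract_last_error_sentence_from_list log = String.ofList (pvA (PySem.Chars.strip log.toList)) := rfl

lemma portB_eq (log : String) :
    extract_last_error_sentence_from_list_alt log = String.ofList (pvB (PySem.Chars.strip log.toList)) := by
  unfold extract_last_error_sentence_from_list_alt pvB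
  by_cases h : PySem.Chars.find (PySem.Chars.strip log.toList) pvErr = -1 <;> simp [h]

-- ---- line splitting ----

def pvSplit : List Char → List (List Char)
  | [] => [[]]
  | c :: r => if c = '\n' then [] :: pvSplit r else (pvSplit r).modifyHead (c :: ·)

lemma pvSplit_ne_nil (cs : List Char) : pvSplit cs ≠ [] := by
  cases cs with
  | nil => simp [pvSplit]
  | cons c r =>
    simp only [pvSplit]
    split
    · simp
    · intro h
      exact pvSplit_ne_nil r (by simpa using congrArg List.length h)

lemma modifyHead_ext {α : Type} {f g : α → α} (h : ∀ x, f x = g x) (l : List α) :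
    List.modifyHead f l = List.modifyHead g l := by cases l <;> simp [h]

lemma modifyHead_id' {α : Type} (l : List α) : List.modifyHead (fun x => x) l = l := by
  cases l <;> simp

lemma splitOn_go_eq (fuel : Nat) : ∀ (l cur : List Char) (acc : List (List Char)),
    l.length ≤ fuel →
    PySem.Chars.splitOn.go ['\n'] fuel l cur acc
      = acc.reverse ++ (pvSplit l).modifyHead (cur.reverse ++ ·) := by
  induction fuel with
  | zero =>
    intro l cur acc h
    have hl : l = [] := by simpa using h
    subst hl
    rw [PySem.Chars.splitOn.go]
    simp [pvSplit]
  | succ fuel ih =>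
    intro l cur acc h
    cases l with
    | nil =>
      rw [PySem.Chars.splitOn.go]
      · simp [pvSplit]
      · omega
    | cons c rest =>
      rw [PySem.Chars.splitOn.go]
      simp only [List.length_cons] at h
      by_cases hc : c = '\n'
      · subst hc
        rw [if_pos (by simp [List.isPrefixOf])]
        rw [ih _ _ _ (by simpa using h)]
        simp only [pvSplit, if_pos rfl]
        simp [modifyHead_id']
      · have hc' : ¬ ('\n' : Char) = c := fun h' => hc h'.symm
        rw [if_neg (by simp [List.isPrefixOf, hc'])]
        rw [ih _ _ _ (by omega)]
        simp only [pvSplit, if_neg hc, List.modifyHead_modifyHead]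
        congr 1
        apply modifyHead_ext
        intro x
        simp

lemma splitOn_eq (cs : List Char) : PySem.Chars.splitOn cs ['\n'] = pvSplit cs := by
  rw [PySem.Chars.splitOn, splitOn_go_eq _ _ _ _ (by omega)]
  simp [modifyHead_id']

lemma pvSplit_no_nl {cs : List Char} (h : '\n' ∉ cs) : pvSplit cs = [cs] := by
  induction cs with
  | nil => rfl
  | cons c r ih =>
    simp only [List.mem_cons, not_or] at h
    have hc : ¬ c = '\n' := fun hc => h.1 hc.symm
    simp [pvSplit, hc, ih h.2]

lemma pvSplit_break {l : List Char} (r : List Char) (h : '\n' ∉ l) :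
    pvSplit (l ++ '\n' :: r) = l :: pvSplit r := by
  induction l with
  | nil => simp [pvSplit]
  | cons c t ih =>
    simp only [List.mem_cons, not_or] at h
    have hc : ¬ c = '\n' := fun hc => h.1 hc.symm
    simp [pvSplit, hc, ih h.2]

lemma pvSplit_cons (cs : List Char) : ∃ b rest, pvSplit cs = b :: rest := by
  rcases h : pvSplit cs with _ | ⟨b, rest⟩
  · exact absurd h (pvSplit_ne_nil _)
  · exact ⟨b, rest, rfl⟩

lemma join_pvSplit (cs : List Char) : PySem.Chars.join ['\n'] (pvSplit cs) = cs := by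
  induction cs with
  | nil => simpa [pvSplit] using PySem.Chars.join_singleton ['\n'] []
  | cons c r ih =>
    obtain ⟨b, rest, hb⟩ := pvSplit_cons r
    by_cases hc : c = '\n'
    · subst hc
      rw [show pvSplit ('\n' :: r) = [] :: pvSplit r from by simp [pvSplit], hb,
        PySem.Chars.join_cons_cons, ← hb, ih]
      simp
    · rw [show pvSplit (c :: r) = (pvSplit r).modifyHead (c :: ·) from by simp [pvSplit, hc], hb]
      cases rest with
      | nil =>
        simp only [List.modifyHead, PySem.Chars.join_singleton]
        rw [hb] at ih
        rw [PySem.Chars.join_singleton] at ih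
        simp [ih]
      | cons b2 rest2 =>
        simp only [List.modifyHead]
        rw [hb] at ih
        rw [PySem.Chars.join_cons_cons] at ih ⊢
        rw [← ih]
        simp

lemma find_eq_of {s sub : List Char} (k : Nat) (h1 : sub <+: s.drop k)
    (h2 : ∀ i, i < k → ¬ sub <+: s.drop i) : PySem.Chars.find s sub = k := by
  have hIs : PySem.Chars.isIn sub s = true :=
    (PySem.Chars.exists_prefix_drop_iff_isIn sub s).1 ⟨k, h1⟩
  have h0 : 0 ≤ PySem.Chars.find s sub :=
    (PySem.Chars.find_nonneg_iff s sub).2 ((PySem.Chars.isIn_iff_infix sub s).1 hIs)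
  obtain ⟨hp, hmin⟩ := PySem.Chars.find_spec h0
  rcases lt_trichotomy (PySem.Chars.find s sub).toNat k with h | h | h
  · exact absurd hp (h2 _ h)
  · rw [← h, Int.toNat_of_nonneg h0]
  · exact absurd h1 (hmin k h)

lemma rfind_go_cases (s sub : List Char) (j : Nat) :
    (PySem.Chars.rfind.go s sub j = -1 ∧ ∀ i ≤ j, ¬ sub <+: s.drop i) ∨
    (∃ k : Nat, k ≤ j ∧ PySem.Chars.rfind.go s sub j = k ∧ sub <+: s.drop k ∧
      ∀ i, k < i → i ≤ j → ¬ sub <+: s.drop i) := by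
  induction j with
  | zero =>
    rw [PySem.Chars.rfind.go]
    by_cases hp : sub.isPrefixOf s = true
    · right
      refine ⟨0, le_rfl, by rw [if_pos hp]; simp, by simpa using List.isPrefixOf_iff_prefix.1 hp, ?_⟩
      intro i hi hi0
      omega
    · left
      refine ⟨by rw [if_neg hp], ?_⟩
      intro i hi
      interval_cases i
      simpa using fun h => hp (List.isPrefixOf_iff_prefix.2 h)
  | succ j ih =>
    rw [PySem.Chars.rfind.go]
    by_cases hp : sub.isPrefixOf (s.drop (j + 1)) = true
    · right
      refine ⟨j + 1, le_rfl, by rw [if_pos hp], List.isPrefixOf_iff_prefix.1 hp, ?_⟩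
      intro i hi hi'
      omega
    · rw [if_neg hp]
      have hnp : ¬ sub <+: s.drop (j + 1) := fun h => hp (List.isPrefixOf_iff_prefix.2 h)
      rcases ih with ⟨hval, hall⟩ | ⟨k, hk, hval, hpre, hmax⟩
      · left
        refine ⟨hval, ?_⟩
        intro i hi
        rcases Nat.lt_or_ge i (j + 1) with h | h
        · exact hall i (by omega)
        · have : i = j + 1 := by omega
          subst this
          exact hnp
      · right
        refine ⟨k, by omega, hval, hpre, ?_⟩
        intro i hi hi'
        rcases Nat.lt_or_ge i (j + 1) with h | h
        · exact hmax i hi (by omega)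
        · have : i = j + 1 := by omega
          subst this
          exact hnp

lemma rfind_eq_of {s sub : List Char} (k : Nat) (hk : k ≤ s.length) (h1 : sub <+: s.drop k)
    (h2 : ∀ i, k < i → i ≤ s.length → ¬ sub <+: s.drop i) : PySem.Chars.rfind s sub = k := by
  rw [PySem.Chars.rfind]
  rcases rfind_go_cases s sub s.length with ⟨_, hall⟩ | ⟨k', hk', hval, hpre, hmax⟩
  · exact absurd h1 (hall k hk)
  · rw [hval]
    rcases lt_trichotomy k' k with h | h | h
    · exact absurd h1 (hmax k h hk)
    · rw [h]
    · exact absurd hpre (h2 k' h hk')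

lemma rfind_eq_neg {s sub : List Char} (h : ∀ i, i ≤ s.length → ¬ sub <+: s.drop i) :
    PySem.Chars.rfind s sub = -1 := by
  rw [PySem.Chars.rfind]
  rcases rfind_go_cases s sub s.length with ⟨hval, _⟩ | ⟨k, hk, _, hpre, _⟩
  · exact hval
  · exact absurd hpre (h k hk)

lemma rfindFrom_zero_some (s sub : List Char) (m : Int) (h0 : 0 ≤ m) (h1 : m ≤ s.length) :
    PySem.Chars.rfindFrom s sub 0 (some m) = PySem.Chars.rfind (s.take m.toNat) sub := by
  rw [PySem.Chars.rfindFrom]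
  have hA : ¬ (s.length : Int) < m := not_lt.2 h1
  have hB : ¬ m < 0 := not_lt.2 h0
  have hC : ¬ (0 : Int) < 0 := by omega
  simp only [if_neg hA, if_neg hB, if_neg hC, Int.toNat_zero, List.drop_zero, zero_add]
  by_cases hr : PySem.Chars.rfind (s.take m.toNat) sub = -1
  · rw [if_pos hr, hr]
  · rw [if_neg hr]
lemma find?_enumerate_shift (xs : List (List Char)) (p : List Char → Bool) : ∀ (s : Int),
    (PySem.List.enumerate xs s).find? (fun q => p q.2)
      = ((PySem.List.enumerate xs 0).find? (fun q => p q.2)).map (fun q => (q.1 + s, q.2)) := by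
  induction xs with
  | nil => intro s; simp [PySem.List.enumerate_nil]
  | cons x xs ih =>
    intro s
    rw [PySem.List.enumerate_cons, PySem.List.enumerate_cons, List.find?_cons, List.find?_cons]
    by_cases hp : p x
    · simp [hp]
    · simp only [hp]
      rw [ih (s + 1), show (0:Int) + 1 = 1 from by norm_num, ih 1, Option.map_map]
      congr 1
      funext q
      simp only [Function.comp_apply, Prod.mk.injEq]
      refine ⟨by ring, trivial⟩

lemma singleton_prefix_mem {c : Char} {t : List Char} {i : Nat} (h : [c] <+: t.drop i) : c ∈ t := by
  have : c ∈ t.drop i := h.subset (by simp)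
  exact List.mem_of_mem_drop this

lemma no_prefix_in_first_line {l r sub : List Char} (hnl : '\n' ∉ sub)
    (hl : ¬ sub <:+: l) {j : Nat} (hj : j ≤ l.length) :
    ¬ sub <+: (l ++ '\n' :: r).drop j := by
  intro hpre
  rw [List.drop_append_of_le_length hj] at hpre
  by_cases hlen : sub.length ≤ (l.drop j).length
  · have hsp : sub <+: l.drop j := (List.isPrefix_append_of_length hlen).mp hpre
    exact hl (hsp.isInfix.trans (List.drop_suffix j l).isInfix)
  · push_neg at hlen
    have hdp : l.drop j <+: sub :=
      List.prefix_of_prefix_length_le (List.prefix_append _ _) hpre (le_of_lt hlen)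
    obtain ⟨t, ht⟩ := hdp
    have htp : l.drop j ++ t <+: l.drop j ++ '\n' :: r := ht ▸ hpre
    have ht' : t <+: '\n' :: r := (List.prefix_append_right_inj _).1 htp
    cases t with
    | nil => rw [← ht] at hlen; simp at hlen
    | cons a t' =>
      have : a = '\n' := ((List.cons_prefix_cons).1 ht').1
      subst this
      exact hnl (by rw [← ht]; simp)

lemma decomp (cs : List Char) :
    '\n' ∉ cs ∨ ∃ l r, cs = l ++ '\n' :: r ∧ '\n' ∉ l := by
  induction cs with
  | nil => left; simp
  | cons c rest ih =>
    by_cases hc : c = '\n'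
    · subst hc; right; exact ⟨[], rest, rfl, by simp⟩
    · rcases ih with h | ⟨l, r, rfl, hl⟩
      · left; simp only [List.mem_cons, not_or]; exact ⟨fun h' => hc h'.symm, h⟩
      · right
        refine ⟨c :: l, r, rfl, ?_⟩
        simp only [List.mem_cons, not_or]
        exact ⟨fun h' => hc h'.symm, hl⟩

lemma drop_break (l : List Char) (c : Char) (r : List Char) (d : Nat) :
    (l ++ c :: r).drop (l.length + (d + 1)) = r.drop d := by
  rw [List.drop_append, List.drop_of_length_le (by omega)]
  simp only [List.nil_append]
  rw [show l.length + (d + 1) - l.length = d + 1 from by omega, List.drop_succ_cons]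

lemma take_break (l : List Char) (c : Char) (r : List Char) (d : Nat) :
    (l ++ c :: r).take (l.length + (d + 1)) = l ++ c :: r.take d := by
  rw [List.take_append, List.take_of_length_le (by omega)]
  rw [show l.length + (d + 1) - l.length = d + 1 from by omega, List.take_succ_cons]

lemma rfind_ge_neg_one (s sub : List Char) : -1 ≤ PySem.Chars.rfind s sub := by
  rw [PySem.Chars.rfind]
  rcases rfind_go_cases s sub s.length with ⟨hval, _⟩ | ⟨k, _, hval, _, _⟩ <;> rw [hval] <;> omega

lemma rfind_nl_break (l T : List Char) (hl : '\n' ∉ l) :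
    PySem.Chars.rfind (l ++ '\n' :: T) ['\n']
      = l.length + (PySem.Chars.rfind T ['\n'] + 1) := by
  have hlen : (l ++ '\n' :: T).length = l.length + 1 + T.length := by simp; omega
  rcases rfind_go_cases T ['\n'] T.length with ⟨hval, hall⟩ | ⟨k, hk, hval, hpre, hmax⟩
  · have hT : PySem.Chars.rfind T ['\n'] = -1 := by rw [PySem.Chars.rfind]; exact hval
    rw [hT]
    have hres : PySem.Chars.rfind (l ++ '\n' :: T) ['\n'] = (l.length : Int) := by
      apply rfind_eq_of l.length (by rw [hlen]; omega)
      · rw [List.drop_append_of_le_length le_rfl]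
        simp
      · intro i hi hi' hp
        rw [hlen] at hi'
        rw [show i = l.length + ((i - l.length - 1) + 1) from by omega, drop_break] at hp
        exact absurd hp (hall (i - l.length - 1) (by omega))
    rw [hres]
    ring
  · have hT : PySem.Chars.rfind T ['\n'] = (k : Int) := by rw [PySem.Chars.rfind]; exact hval
    rw [hT]
    have hkl : k < T.length := by
      rcases Nat.lt_or_ge k T.length with h | h
      · exact h
      · exfalso
        rw [List.drop_of_length_le h] at hpre
        simpa using hpre.length_le
    have hres : PySem.Chars.rfind (l ++ '\n' :: T) ['\n'] = ((l.length + (k + 1) : Nat) : Int) := by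
      apply rfind_eq_of _ (by rw [hlen]; omega)
      · rw [drop_break]
        exact hpre
      · intro i hi hi' hp
        rw [hlen] at hi'
        rw [show i = l.length + ((i - l.length - 1) + 1) from by omega, drop_break] at hp
        exact absurd hp (hmax (i - l.length - 1) (by omega) (by omega))
    rw [hres]
    push_cast
    ring

-- facts about the search substring
lemma pvErr_no_nl : '\n' ∉ pvErr := by decide
lemma pvErr_ne_nil : pvErr ≠ [] := by decide

-- ---- case lemmas for pvA ----

lemma A_nonl_pos {cs : List Char} (h : '\n' ∉ cs) (hE : pvErr <:+: cs) : pvA cs = cs := by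
  unfold pvA
  rw [splitOn_eq, pvSplit_no_nl h]
  have hIs : PySem.Chars.isIn pvErr cs = true := (PySem.Chars.isIn_iff_infix _ _).2 hE
  simp only [PySem.List.enumerate_cons, PySem.List.enumerate_nil, List.find?_cons, hIs,
    Option.map_some]
  rw [PySem.List.slice_from _ le_rfl]
  simp [PySem.Chars.join_singleton]

lemma A_nonl_neg {cs : List Char} (h : '\n' ∉ cs) (hE : ¬ pvErr <:+: cs) : pvA cs = [] := by
  unfold pvA
  rw [splitOn_eq, pvSplit_no_nl h]
  have hIs : PySem.Chars.isIn pvErr cs = false := by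
    rw [PySem.Chars.isIn_eq_false_iff]; exact hE
  simp [PySem.List.enumerate_cons, PySem.List.enumerate_nil, List.find?_cons, hIs]

lemma A_first {l : List Char} (r : List Char) (hl : '\n' ∉ l) (hE : pvErr <:+: l) :
    pvA (l ++ '\n' :: r) = l ++ '\n' :: r := by
  unfold pvA
  rw [splitOn_eq, pvSplit_break r hl]
  have hIs : PySem.Chars.isIn pvErr l = true := (PySem.Chars.isIn_iff_infix _ _).2 hE
  simp only [PySem.List.enumerate_cons, List.find?_cons, hIs, Option.map_some]
  rw [PySem.List.slice_from _ le_rfl]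
  simp only [Int.toNat_zero, List.drop_zero]
  obtain ⟨b, rest, hb⟩ := pvSplit_cons r
  rw [if_neg (by simp), hb, PySem.Chars.join_cons_cons, ← hb, join_pvSplit]
  simp

lemma A_break {l : List Char} (r : List Char) (hl : '\n' ∉ l) (hE : ¬ pvErr <:+: l) :
    pvA (l ++ '\n' :: r) = pvA r := by
  unfold pvA
  rw [splitOn_eq, splitOn_eq, pvSplit_break r hl]
  have hIs : PySem.Chars.isIn pvErr l = false := by
    rw [PySem.Chars.isIn_eq_false_iff]; exact hE
  simp only [PySem.List.enumerate_cons, List.find?_cons, hIs]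
  rw [show ((0:Int) + 1) = 1 from by norm_num, find?_enumerate_shift _ _ 1]
  rcases hq : (PySem.List.enumerate (pvSplit r) 0).find? (fun q => PySem.Chars.isIn pvErr q.2)
    with _ | q
  · rw [hq]
    rfl
  · obtain ⟨k, hklt, hqk⟩ := (PySem.List.mem_enumerate_iff _ _ _).1 (List.mem_of_find?_eq_some hq)
    have hq1 : q.1 = (k : Int) := by rw [hqk]; simp
    rw [hq]
    simp only [Option.map_some, hq1]
    rw [show ((k : Int) + 1) = ((k + 1 : Nat) : Int) from by push_cast; ring,
      PySem.List.slice_from _ (by positivity), PySem.List.slice_from _ (by positivity)]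
    simp only [Int.toNat_natCast, List.drop_succ_cons]

-- ---- case lemmas for pvB ----

lemma B_nonl_pos {cs : List Char} (h : '\n' ∉ cs) (hE : pvErr <:+: cs) : pvB cs = cs := by
  unfold pvB
  have h0 : 0 ≤ PySem.Chars.find cs pvErr := (PySem.Chars.find_nonneg_iff _ _).2 hE
  rw [if_neg (by omega), rfindFrom_zero_some _ _ _ h0 (PySem.Chars.find_le_length cs pvErr)]
  have hr : PySem.Chars.rfind (cs.take (PySem.Chars.find cs pvErr).toNat) ['\n'] = -1 :=
    rfind_eq_neg (fun i _ hp => h (List.mem_of_mem_take (singleton_prefix_mem hp)))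
  rw [hr, show (-1 : Int) + 1 = 0 from by ring]
  simp only [PySem.Chars.slice_eq_listSlice]
  rw [PySem.List.slice_from _ le_rfl]
  simp

lemma B_nonl_neg {cs : List Char} (hE : ¬ pvErr <:+: cs) : pvB cs = [] := by
  unfold pvB
  rw [if_pos ((PySem.Chars.find_eq_neg_one_iff _ _).2 hE)]

lemma B_first {l : List Char} (r : List Char) (hl : '\n' ∉ l) (hE : pvErr <:+: l) :
    pvB (l ++ '\n' :: r) = l ++ '\n' :: r := by
  obtain ⟨u, v, huv⟩ := hE
  have hul : u.length + pvErr.length ≤ l.length := by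
    rw [← huv]; simp
  have hshape : l ++ '\n' :: r = u ++ (pvErr ++ (v ++ '\n' :: r)) := by
    rw [← huv]; simp [List.append_assoc]
  have hpre_j : pvErr <+: (l ++ '\n' :: r).drop u.length := by
    rw [hshape, List.drop_left]
    exact List.prefix_append _ _
  have hinf : pvErr <:+: (l ++ '\n' :: r) :=
    ((PySem.Chars.isIn_iff_infix _ _).1
      ((PySem.Chars.exists_prefix_drop_iff_isIn _ _).1 ⟨u.length, hpre_j⟩))
  have h0 : 0 ≤ PySem.Chars.find (l ++ '\n' :: r) pvErr := (PySem.Chars.find_nonneg_iff _ _).2 hinf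
  obtain ⟨hp, hmin⟩ := PySem.Chars.find_spec h0
  have hm : (PySem.Chars.find (l ++ '\n' :: r) pvErr).toNat ≤ u.length := by
    by_contra hc
    exact (hmin u.length (by omega)) hpre_j
  have hml : (PySem.Chars.find (l ++ '\n' :: r) pvErr).toNat ≤ l.length := by
    have := pvErr_ne_nil
    have : 1 ≤ pvErr.length := by
      cases hpe : pvErr with
      | nil => exact absurd hpe pvErr_ne_nil
      | cons a b => simp
    omega
  unfold pvB
  rw [if_neg (by omega),
    rfindFrom_zero_some _ _ _ h0 (PySem.Chars.find_le_length _ _)]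
  have htake : (l ++ '\n' :: r).take (PySem.Chars.find (l ++ '\n' :: r) pvErr).toNat
      = l.take (PySem.Chars.find (l ++ '\n' :: r) pvErr).toNat :=
    List.take_append_of_le_length hml
  have hr : PySem.Chars.rfind
      ((l ++ '\n' :: r).take (PySem.Chars.find (l ++ '\n' :: r) pvErr).toNat) ['\n'] = -1 := by
    apply rfind_eq_neg
    intro i _ hpref
    have : '\n' ∈ (l ++ '\n' :: r).take (PySem.Chars.find (l ++ '\n' :: r) pvErr).toNat :=
      singleton_prefix_mem hpref
    rw [htake] at this
    exact hl (List.mem_of_mem_take this)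
  rw [hr, show (-1 : Int) + 1 = 0 from by ring]
  simp only [PySem.Chars.slice_eq_listSlice]
  rw [PySem.List.slice_from _ le_rfl]
  simp

lemma B_break {l : List Char} (r : List Char) (hl : '\n' ∉ l) (hE : ¬ pvErr <:+: l) :
    pvB (l ++ '\n' :: r) = pvB r := by
  by_cases hEr : pvErr <:+: r
  · have h0r : 0 ≤ PySem.Chars.find r pvErr := (PySem.Chars.find_nonneg_iff _ _).2 hEr
    obtain ⟨hpre_r, hmin_r⟩ := PySem.Chars.find_spec h0r
    have hm0 : (PySem.Chars.find r pvErr).toNat ≤ r.length := by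
      have := PySem.Chars.find_le_length r pvErr
      omega
    have hfind : PySem.Chars.find (l ++ '\n' :: r) pvErr
        = ((l.length + ((PySem.Chars.find r pvErr).toNat + 1) : Nat) : Int) := by
      apply find_eq_of
      · rw [drop_break]
        exact hpre_r
      · intro i hi hpref
        rcases Nat.lt_or_ge i (l.length + 1) with h | h
        · exact no_prefix_in_first_line pvErr_no_nl hE (by omega) hpref
        · rw [show i = l.length + ((i - l.length - 1) + 1) from by omega, drop_break] at hpref
          exact hmin_r (i - l.length - 1) (by omega) hpref
    unfold pvB
    rw [hfind, if_neg (by omega), if_neg (by omega)]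
    rw [rfindFrom_zero_some _ _ _ (by positivity) (by simp; omega),
      rfindFrom_zero_some _ _ _ h0r (PySem.Chars.find_le_length _ _)]
    rw [show (((l.length + ((PySem.Chars.find r pvErr).toNat + 1) : Nat) : Int)).toNat
        = l.length + (((PySem.Chars.find r pvErr).toNat) + 1) from by omega]
    rw [take_break, rfind_nl_break _ _ hl]
    have hrb := rfind_ge_neg_one (r.take (PySem.Chars.find r pvErr).toNat) ['\n']
    set ρ := PySem.Chars.rfind (r.take (PySem.Chars.find r pvErr).toNat) ['\n'] with hρ
    simp only [PySem.Chars.slice_eq_listSlice]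
    rw [PySem.List.slice_from _ (by omega), PySem.List.slice_from _ (by omega)]
    rw [show ((l.length : Int) + (ρ + 1) + 1).toNat = l.length + ((ρ + 1).toNat + 1) from by omega,
      drop_break]
  · have hcs : ¬ pvErr <:+: (l ++ '\n' :: r) := by
      intro hinf
      have h0 : 0 ≤ PySem.Chars.find (l ++ '\n' :: r) pvErr :=
        (PySem.Chars.find_nonneg_iff _ _).2 hinf
      obtain ⟨hp, _⟩ := PySem.Chars.find_spec h0
      set i := (PySem.Chars.find (l ++ '\n' :: r) pvErr).toNat with hi
      rcases Nat.lt_or_ge i (l.length + 1) with h | h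
      · exact no_prefix_in_first_line pvErr_no_nl hE (by omega) hp
      · rw [show i = l.length + ((i - l.length - 1) + 1) from by omega, drop_break] at hp
        exact hEr ((PySem.Chars.isIn_iff_infix _ _).1
          ((PySem.Chars.exists_prefix_drop_iff_isIn _ _).1 ⟨i - l.length - 1, hp⟩))
    unfold pvB
    rw [if_pos ((PySem.Chars.find_eq_neg_one_iff _ _).2 hcs),
      if_pos ((PySem.Chars.find_eq_neg_one_iff _ _).2 hEr)]

-- ---- the main induction ----

lemma core : ∀ (n : Nat) (cs : List Char), cs.length ≤ n → pvA cs = pvB cs := by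
  intro n
  induction n with
  | zero =>
    intro cs h
    have hnil : cs = [] := by
      cases cs with
      | nil => rfl
      | cons a b => simp at h
    subst hnil
    have hE : ¬ pvErr <:+: ([] : List Char) := by
      intro h'
      have := h'.length_le
      simp [pvErr] at this
    rw [A_nonl_neg (by simp) hE, B_nonl_neg hE]
  | succ n ih =>
    intro cs h
    rcases decomp cs with hno | ⟨l, r, rfl, hl⟩
    · by_cases hE : pvErr <:+: cs
      · rw [A_nonl_pos hno hE, B_nonl_pos hno hE]
      · rw [A_nonl_neg hno hE, B_nonl_neg hE]
    · by_cases hE : pvErr <:+: l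
      · rw [A_first r hl hE, B_first r hl hE]
      · rw [A_break r hl hE, B_break r hl hE]
        exact ih r (by simp at h; omega)

-- ===== VERDICT (by name: the statement is the Claim_ definition above) =====
theorem extract_last_error_sentence_from_list_spec : Claim_equal_extract_last_error_sentence_from_list := by
  intro log _
  unfold Spec_extract_last_error_sentence_from_list
  rw [portA_eq, portB_eq, core (PySem.Chars.strip log.toList).length _ le_rfl]
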